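-- pv_equiv track=rewrite | github.com/2025-1-analitica-descriptiva/LAB-03-ingestion-de-texto-plano-canojuanpa800 | homework/pregunta_01.py | join_rows
-- ===== SOURCE A (Python) =====
-- def join_rows(data):
--     join_rows = []
--     join_row = ''
--     for row in data:
--         if row == '\n' or row == '                                         \n':
--             join_rows.append(join_row)
--             join_row = ''
--             continue
--         join_row += row
--     return join_rows
-- ===== SOURCE B (Python) =====
-- def join_rows(data):
--     seps = ('\n', ' ' * 41 + '\n')
--     out = []
--     start = 0
--     n = len(data)
--     while True:
--         j = next((k for k in range(start, n) if data[k] in seps), None)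
--         if j is None:
--             return out
--         out.append(''.join(data[start:j]))
--         start = j + 1
-- ===== Notes on version B (the rewrite author's own statement) =====
-- stated objective: alternative
-- what changed: Replaced the row-by-row accumulator loop with a find-next-separator scan: B repeatedly locates the next separator row and emits the join of the slice since the previous one, dropping the tail after the last separator implicitly.
import Mathlib
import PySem

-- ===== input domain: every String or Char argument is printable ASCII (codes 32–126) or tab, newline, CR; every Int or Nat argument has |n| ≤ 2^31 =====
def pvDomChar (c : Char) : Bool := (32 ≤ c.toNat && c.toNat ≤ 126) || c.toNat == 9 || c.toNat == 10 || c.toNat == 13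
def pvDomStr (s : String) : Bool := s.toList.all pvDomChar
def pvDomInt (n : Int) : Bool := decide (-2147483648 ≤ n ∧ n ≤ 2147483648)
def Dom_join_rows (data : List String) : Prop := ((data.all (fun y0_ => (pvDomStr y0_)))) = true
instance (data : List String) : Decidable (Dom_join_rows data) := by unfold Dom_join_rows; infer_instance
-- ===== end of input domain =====

-- B replaces A's row-by-row accumulator loop with a find-next-separator scan that emits the
-- join of each slice between separators (alternative decomposition, same cost).

-- the 41-space separator row shared by the two Python sources
def pvSep41 : String := "                                         \n"

-- row == '\n' or row == ' '*41 + '\n'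
def pvIsSep (r : String) : Bool := r == "\n" || r == pvSep41

-- ===== PORT A =====
-- A: one foldl over the rows carrying (blocks so far, current accumulated string)
def join_rows (data : List String) : List String :=
  (data.foldl
    (fun (st : List String × String) row =>
      if pvIsSep row then (st.1 ++ [st.2], "") else (st.1, st.2 ++ row))
    ([], "")).1

-- ===== PORT B =====
-- B: find the index of the next separator; emit ''.join of the slice before it; continue after it.
def join_rows_alt (data : List String) : List String :=
  match h : data.findIdx? pvIsSep with
  | none => []
  | some j => String.join (data.take j) :: join_rows_alt (data.drop (j + 1))
termination_by data.length
decreasing_by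
  have := List.findIdx?_eq_some_iff_findIdx_eq.mp h
  simp [List.length_drop]; omega

-- ===== PRECONDITION & SPEC =====
def Spec_join_rows (data : List String) (out : List String) : Prop := out = join_rows_alt data
instance (data : List String) (out : List String) : Decidable (Spec_join_rows data out) := by unfold Spec_join_rows; infer_instance

-- ===== CLAIM (what is proved, stated in full; the proofs are below) =====
def Claim_equal_join_rows : Prop := ∀ (data : List String), Dom_join_rows data → Spec_join_rows data (join_rows data)

-- ===== LEMMAS AND PROOFS =====

-- A's loop, written as structural recursion on the remaining rows
def pvAuxA (cur : String) : List String → List String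
  | [] => []
  | r :: rs => if pvIsSep r then cur :: pvAuxA "" rs else pvAuxA (cur ++ r) rs

theorem pv_foldl_eq_auxA (data : List String) :
    ∀ (acc : List String) (cur : String),
      (data.foldl
        (fun (st : List String × String) row =>
          if pvIsSep row then (st.1 ++ [st.2], "") else (st.1, st.2 ++ row))
        (acc, cur)).1 = acc ++ pvAuxA cur data := by
  induction data with
  | nil => intro acc cur; simp [pvAuxA]
  | cons r rs ih =>
    intro acc cur
    by_cases h : pvIsSep r = true <;>
      simp [pvAuxA, h, ih, List.append_assoc]

theorem pv_join_cons (s : String) (l : List String) :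
    String.join (s :: l) = s ++ String.join l := by
  have gen : ∀ (l : List String) (a : String),
      List.foldl (fun r t => r ++ t) a l = a ++ List.foldl (fun r t => r ++ t) "" l := by
    intro l
    induction l with
    | nil => intro a; simp
    | cons x xs ih =>
      intro a
      simp only [List.foldl]
      rw [ih (a ++ x), ih (("" : String) ++ x), String.append_assoc]
      simp
  simp only [String.join, List.foldl]
  rw [gen l (("" : String) ++ s)]
  simp

theorem pv_alt_eq_none (data : List String) (h : data.findIdx? pvIsSep = none) :
    join_rows_alt data = [] := by
  rw [join_rows_alt]
  split
  · rfl
  · rename_i j heq; rw [h] at heq; cases heq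

theorem pv_alt_eq_some (data : List String) (j : Nat) (h : data.findIdx? pvIsSep = some j) :
    join_rows_alt data = String.join (data.take j) :: join_rows_alt (data.drop (j + 1)) := by
  rw [join_rows_alt]
  split
  · rename_i heq; rw [h] at heq; cases heq
  · rename_i k heq; rw [h] at heq; cases heq; rfl

theorem pv_auxA_eq_alt (data : List String) :
    ∀ (cur : String),
      pvAuxA cur data =
        match join_rows_alt data with
        | [] => []
        | b :: bs => (cur ++ b) :: bs := by
  induction data with
  | nil => intro cur; simp [pvAuxA, pv_alt_eq_none [] (by simp)]
  | cons r rs ih =>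
    intro cur
    by_cases h : pvIsSep r = true
    · rw [pv_alt_eq_some (r :: rs) 0 (by simp [List.findIdx?_cons, h])]
      simp only [List.take_zero, List.drop_succ_cons, List.drop_zero]
      simp only [pvAuxA, h, if_pos]
      rw [ih ""]
      cases hrs : join_rows_alt rs <;> simp [String.join]
    · simp only [pvAuxA, h, if_neg, Bool.false_eq_true, not_false_iff]
      rw [ih (cur ++ r)]
      cases hrs : rs.findIdx? pvIsSep with
      | none =>
        rw [pv_alt_eq_none (r :: rs) (by simp [List.findIdx?_cons, h, hrs]),
            pv_alt_eq_none rs hrs]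
      | some j =>
        rw [pv_alt_eq_some (r :: rs) (j + 1) (by simp [List.findIdx?_cons, h, hrs]),
            pv_alt_eq_some rs j hrs]
        simp [pv_join_cons, String.append_assoc]

-- ===== VERDICT (by name: the statement is the Claim_ definition above) =====
theorem join_rows_spec : Claim_equal_join_rows := by
  intro data _
  unfold Spec_join_rows join_rows
  rw [pv_foldl_eq_auxA data [] "", pv_auxA_eq_alt data ""]
  cases join_rows_alt data <;> simp
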